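-- pv_equiv track=rewrite | github.com/1600915Faty/ats_practica2 | main.py | shuffle_function
-- ===== SOURCE A (Python) =====
-- def shuffle_function(mapped_list):
--     """Función Shuffle que agrupa las frecuencias por palabra."""
--     results = {}
--     for block in mapped_list:
--         for word in block:
--             w = word.items()
--             for name, value in w:
--                 if name not in results:
--                     results[name] = []
--                 results[name].append(1)
--     return results
-- ===== SOURCE B (Python) =====
-- def shuffle_function(mapped_list):
--     """Flatten once into the list of name occurrences, then build the result
--     per distinct name (first-occurrence order) as [1] * occurrence-count."""
--     names = [name for block in mapped_list for word in block for name in word]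
--     return {name: [1] * names.count(name) for name in dict.fromkeys(names)}
-- ===== Notes on version B (the rewrite author's own statement) =====
-- stated objective: alternative
-- what changed: B flattens the nested input into one flat list of name occurrences, dedupes it in first-occurrence order, and builds each value by a per-name counting scan (names.count) over the flat list, instead of A's incremental dict of growing lists updated once per occurrence during a triple-nested traversal.
import Mathlib
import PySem

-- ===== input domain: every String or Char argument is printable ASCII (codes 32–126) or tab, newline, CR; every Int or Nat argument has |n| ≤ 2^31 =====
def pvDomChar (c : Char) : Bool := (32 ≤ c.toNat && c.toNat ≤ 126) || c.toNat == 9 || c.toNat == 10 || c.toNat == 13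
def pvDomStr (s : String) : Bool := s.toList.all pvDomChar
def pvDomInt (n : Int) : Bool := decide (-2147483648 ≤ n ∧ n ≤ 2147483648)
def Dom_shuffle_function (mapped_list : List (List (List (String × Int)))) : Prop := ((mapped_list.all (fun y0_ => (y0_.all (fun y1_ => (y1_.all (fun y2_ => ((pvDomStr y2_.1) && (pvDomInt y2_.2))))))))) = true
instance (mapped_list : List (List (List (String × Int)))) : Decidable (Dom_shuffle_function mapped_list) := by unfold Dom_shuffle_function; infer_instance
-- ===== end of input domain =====

-- B replaces A's incremental dict-of-growing-lists by: flatten the input to one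
-- occurrence list, dedupe in first-occurrence order, build each value by a
-- per-name counting scan (objective: alternative, not faster).

-- ===== PORT A =====
-- one occurrence: ensure the key exists with [], then append 1 to its list
def pvStepA (d : PySem.Dict String (List Int)) (p : String × Int) : PySem.Dict String (List Int) :=
  let d1 := if d.contains p.1 then d else d.insert p.1 []
  d1.insert p.1 (d1.getD p.1 [] ++ [1])

def shuffle_function (mapped_list : List (List (List (String × Int)))) : List (String × List Int) :=
  (mapped_list.foldl (fun d block =>
    block.foldl (fun d word =>
      word.foldl pvStepA d) d) PySem.Dict.empty).items

-- ===== PORT B =====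
-- 'names' = the flattening comprehension; 'dict.fromkeys(names)' = PySem.List.dedup;
-- 'names.count(name)' = PySem.List.count; '[1] * c' = List.replicate c 1
def shuffle_function_alt (mapped_list : List (List (List (String × Int)))) : List (String × List Int) :=
  let names := mapped_list.flatMap (fun block => block.flatMap (fun word => word.map Prod.fst))
  (PySem.List.dedup names).map (fun name => (name, List.replicate (PySem.List.count names name) (1 : Int)))

-- ===== PRECONDITION & SPEC =====
def Spec_shuffle_function (mapped_list : List (List (List (String × Int)))) (out : List (String × List Int)) : Prop := out = shuffle_function_alt mapped_list
instance (mapped_list : List (List (List (String × Int)))) (out : List (String × List Int)) : Decidable (Spec_shuffle_function mapped_list out) := by unfold Spec_shuffle_function; infer_instance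

-- ===== CLAIM (what is proved, stated in full; the proofs are below) =====
def Claim_equal_shuffle_function : Prop := ∀ (mapped_list : List (List (List (String × Int)))), Dom_shuffle_function mapped_list → Spec_shuffle_function mapped_list (shuffle_function mapped_list)

-- ===== LEMMAS AND PROOFS =====

-- A's step only reads the name of the pair
def pvStepN (d : PySem.Dict String (List Int)) (n : String) : PySem.Dict String (List Int) :=
  let d1 := if d.contains n then d else d.insert n []
  d1.insert n (d1.getD n [] ++ [1])

-- A's triple fold equals the fold over the flattened name list
theorem pvA_names (ml : List (List (List (String × Int)))) :
    shuffle_function ml =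
      ((ml.flatMap (fun block => block.flatMap (fun word => word.map Prod.fst))).foldl
        pvStepN PySem.Dict.empty).items := by
  unfold shuffle_function
  simp only [List.flatMap_def, List.foldl_flatten, List.foldl_map]
  rfl

-- the closed form of A's dict contents after processing a name list
def pvTable (ns : List String) : List (String × List Int) :=
  (PySem.List.dedup ns).map (fun m => (m, List.replicate (PySem.List.count ns m) (1 : Int)))

theorem pvCount_snoc (ns : List String) (n m : String) :
    PySem.List.count (ns ++ [n]) m =
      PySem.List.count ns m + (if m = n then 1 else 0) := by
  by_cases h : m = n
  · subst h
    simp [PySem.List.count_eq, List.count_append]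
  · have hnm : ¬ n = m := fun hh => h hh.symm
    simp [PySem.List.count_eq, List.count_append, h, hnm]

theorem pvDedup_snoc (ns : List String) (n : String) :
    PySem.List.dedup (ns ++ [n]) =
      if n ∈ ns then PySem.List.dedup ns else PySem.List.dedup ns ++ [n] := by
  simp only [PySem.List.dedup_eq_ofList, PySem.Set.ofList_eq_foldl, List.foldl_append,
    List.foldl_cons, List.foldl_nil]
  have hmem : n ∈ List.foldl PySem.Set.add [] ns ↔ n ∈ ns := by
    rw [← PySem.Set.ofList_eq_foldl, ← PySem.List.dedup_eq_ofList]
    exact PySem.List.mem_dedup ns n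
  by_cases h : n ∈ ns
  · simp [PySem.Set.add, hmem.2 h, h]
  · have hn : n ∉ List.foldl PySem.Set.add [] ns := fun hc => h (hmem.1 hc)
    simp [PySem.Set.add, hn, h]

theorem pvFold_items (ns : List String) :
    (ns.foldl pvStepN PySem.Dict.empty).items = pvTable ns := by
  induction ns using List.reverseRecOn with
  | nil => rfl
  | append_singleton ns n ih =>
    rw [List.foldl_append, List.foldl_cons, List.foldl_nil]
    have hD : ns.foldl pvStepN PySem.Dict.empty = PySem.Dict.mk (pvTable ns) :=
      PySem.Dict.ext ih
    rw [hD]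
    have hkeys : (PySem.Dict.mk (pvTable ns)).keys = PySem.List.dedup ns := by
      simp [PySem.Dict.keys, pvTable, Function.comp_def]
    have hnd : (PySem.Dict.mk (pvTable ns)).keys.Nodup := by
      rw [hkeys]; exact PySem.List.nodup_dedup ns
    by_cases h : n ∈ ns
    · -- existing name: append a 1 in place ↔ count goes up by one
      have hcn : (PySem.Dict.mk (pvTable ns)).contains n = true := by
        rw [PySem.Dict.contains_eq_decide_mem_keys, hkeys]
        simp [h]
      have hmem : (n, List.replicate (PySem.List.count ns n) (1 : Int))
          ∈ (PySem.Dict.mk (pvTable ns)).items :=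
        List.mem_map.2 ⟨n, (PySem.List.mem_dedup ns n).2 h, rfl⟩
      have hg : (PySem.Dict.mk (pvTable ns)).getD n []
          = List.replicate (PySem.List.count ns n) (1 : Int) :=
        PySem.Dict.getD_of_mem_items _ hmem hnd []
      unfold pvStepN
      rw [hcn]
      simp only [if_true, hg]
      rw [PySem.Dict.items_insert]
      rw [hcn]
      simp only [if_true]
      unfold pvTable
      rw [pvDedup_snoc, if_pos h]
      simp only [List.map_map]
      apply List.map_congr_left
      intro m _
      by_cases he : m = n
      · subst he
        simp [List.replicate_succ']
      · have hnm : ¬ n = m := fun hh => he hh.symm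
        simp [Function.comp, he, hnm, List.count_singleton, beq_iff_eq]
    · -- fresh name: the pair (n, [1]) is appended at the end
      have hcn : (PySem.Dict.mk (pvTable ns)).contains n = false := by
        rw [PySem.Dict.contains_eq_decide_mem_keys, hkeys]
        simp [PySem.List.mem_dedup, h]
      unfold pvStepN
      rw [hcn]
      simp only [Bool.false_eq_true, if_false]
      rw [PySem.Dict.getD_insert_self, PySem.Dict.insert_insert_self]
      rw [PySem.Dict.items_insert, hcn]
      simp only [Bool.false_eq_true, if_false, List.nil_append]
      unfold pvTable
      rw [pvDedup_snoc, if_neg h, List.map_append]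
      congr 1
      · apply List.map_congr_left
        intro m hm
        have hmn : m ≠ n := by
          intro he
          exact h (he ▸ (PySem.List.mem_dedup ns m).1 hm)
        have hnm : ¬ n = m := fun hh => hmn hh.symm
        simp [pvCount_snoc, hmn, hnm, List.count_singleton]
      · have hc0 : List.count n ns = 0 := List.count_eq_zero.2 h
        simp [PySem.List.count_eq, hc0]

-- ===== VERDICT (by name: the statement is the Claim_ definition above) =====
theorem shuffle_function_spec : Claim_equal_shuffle_function := by
  intro ml _
  unfold Spec_shuffle_function shuffle_function_alt
  rw [pvA_names, pvFold_items]
  rfl
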